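-- pv_equiv track=rewrite | github.com/dyshes/webninja | profiler.py | homogenize
-- ===== SOURCE A (Python) =====
-- def homogenize(profiles):
--     keys = [key for sub in profiles for key in sub]
--     keys = [*set(keys)]
--     keys = sorted(keys)
--     homo_profiles = []
--     for pf in profiles:
--         tmp = {}
--         for k in keys:
--             tmp[k] = pf[k] if k in pf else ''
--         homo_profiles.append(tmp)
--     return homo_profiles
-- ===== SOURCE B (Python) =====
-- def homogenize(profiles):
--     keys = sorted({k for pf in profiles for k in pf})
--     out = []
--     for pf in profiles:
--         items = sorted(pf.items())
--         row = []
--         i = 0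
--         for k in keys:
--             if i < len(items) and items[i][0] == k:
--                 row.append((k, items[i][1]))
--                 i += 1
--             else:
--                 row.append((k, ''))
--         out.append(dict(row))
--     return out
-- ===== Notes on version B (the rewrite author's own statement) =====
-- stated objective: alternative
-- what changed: Instead of testing membership of every key in every profile dict, B sorts each profile's items once and fills the row by a single two-pointer merge of the sorted global key list with the sorted items, so no per-key dict lookup remains.
import Mathlib
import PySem

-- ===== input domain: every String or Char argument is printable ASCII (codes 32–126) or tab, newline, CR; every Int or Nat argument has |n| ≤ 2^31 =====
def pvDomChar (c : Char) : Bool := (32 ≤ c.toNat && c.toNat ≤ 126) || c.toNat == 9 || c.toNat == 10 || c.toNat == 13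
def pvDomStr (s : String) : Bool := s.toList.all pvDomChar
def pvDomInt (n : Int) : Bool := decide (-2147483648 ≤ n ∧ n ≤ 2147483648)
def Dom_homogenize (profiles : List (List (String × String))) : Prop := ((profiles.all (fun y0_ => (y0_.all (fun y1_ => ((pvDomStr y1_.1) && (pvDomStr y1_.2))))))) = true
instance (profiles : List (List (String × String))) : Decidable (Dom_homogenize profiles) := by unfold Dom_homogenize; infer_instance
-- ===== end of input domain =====

-- B replaces A's per-key dict-membership loop by sorting each profile's items and merging them
-- with the global sorted key list in a single two-pointer scan (no per-key lookups); same return value.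

-- ===== PORT A =====
def homogenize (profiles : List (List (String × String))) : List (List (String × String)) :=
  let keys0 := profiles.flatMap (fun sub => (PySem.Dict.ofList sub).keys)
  let keys1 := PySem.Set.ofList keys0
  let keys := PySem.List.sorted keys1 (fun k => k) false
  let homo := profiles.foldl (fun acc pf =>
    let d := PySem.Dict.ofList pf
    let tmp := keys.foldl (fun t k =>
      t.insert k (if d.contains k then (d.get? k).getD "" else "")) (PySem.Dict.empty : PySem.Dict String String)
    acc ++ [tmp.items]) []
  homo

-- ===== PORT B =====
-- the inner 'for k in keys' loop of Source B with its pointer i, written as structural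
-- recursion on keys carrying the remaining suffix items[i:] of the sorted profile items
def mergeRow : List String → List (String × String) → List (String × String)
  | [], _ => []
  | k :: ks, [] => (k, "") :: mergeRow ks []
  | k :: ks, (k', v) :: rest =>
      if k' = k then (k, v) :: mergeRow ks rest
      else (k, "") :: mergeRow ks ((k', v) :: rest)

def homogenize_alt (profiles : List (List (String × String))) : List (List (String × String)) :=
  let keys := PySem.List.sorted
    (PySem.Set.ofList (profiles.flatMap (fun pf => (PySem.Dict.ofList pf).keys)))
    (fun k => k) false
  profiles.map (fun pf =>
    -- sorted(pf.items()): the keys of a dict are distinct, so Python's tuple sort orders by key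
    let items := PySem.List.sorted (PySem.Dict.ofList pf).items (fun p => p.1) false
    (PySem.Dict.ofList (mergeRow keys items)).items)

-- ===== PRECONDITION & SPEC =====
def Spec_homogenize (profiles : List (List (String × String))) (out : List (List (String × String))) : Prop := out = homogenize_alt profiles
instance (profiles : List (List (String × String))) (out : List (List (String × String))) : Decidable (Spec_homogenize profiles out) := by unfold Spec_homogenize; infer_instance

-- ===== CLAIM (what is proved, stated in full; the proofs are below) =====
def Claim_equal_homogenize : Prop := ∀ (profiles : List (List (String × String))), Dom_homogenize profiles → Spec_homogenize profiles (homogenize profiles)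

-- ===== LEMMAS AND PROOFS =====

-- first value for key k in an item list, '' if absent
def lookupD (items : List (String × String)) (k : String) : String :=
  match items.find? (fun p => p.1 == k) with
  | some p => p.2
  | none => ""

lemma lookupD_cons_self (p : String × String) (rest : List (String × String)) :
    lookupD (p :: rest) p.1 = p.2 := by
  simp [lookupD]

lemma lookupD_cons_of_ne (p : String × String) (rest : List (String × String)) (k : String)
    (h : p.1 ≠ k) : lookupD (p :: rest) k = lookupD rest k := by
  simp [lookupD, h]

lemma lookupD_eq_empty (items : List (String × String)) (k : String)
    (h : ∀ p ∈ items, p.1 ≠ k) : lookupD items k = "" := by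
  have : items.find? (fun p => p.1 == k) = none := by
    apply List.find?_eq_none.mpr
    intro p hp hb
    exact h p hp (eq_of_beq hb)
  simp [lookupD, this]

-- the two-pointer merge computes, for each key in order, the profile's value or ''
lemma mergeRow_eq_map (keys : List String) (items : List (String × String))
    (hks : keys.Pairwise (· < ·))
    (hit : items.Pairwise (fun a b => a.1 < b.1))
    (hsub : ∀ p ∈ items, p.1 ∈ keys) :
    mergeRow keys items = keys.map (fun k => (k, lookupD items k)) := by
  induction keys generalizing items with
  | nil => simp [mergeRow]
  | cons k ks ih =>
    have hksp := (List.pairwise_cons.mp hks).1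
    have hks' := (List.pairwise_cons.mp hks).2
    cases items with
    | nil =>
      simp only [mergeRow, List.map_cons]
      exact congrArg _ (ih [] hks' List.Pairwise.nil (by simp))
    | cons p rest =>
      have hitp := (List.pairwise_cons.mp hit).1
      have hit' := (List.pairwise_cons.mp hit).2
      by_cases h : p.1 = k
      · -- head of items matches the current key
        have hrest_sub : ∀ q ∈ rest, q.1 ∈ ks := by
          intro q hq
          have hgt : p.1 < q.1 := hitp q hq
          have : q.1 ∈ k :: ks := hsub q (List.mem_cons_of_mem _ hq)
          rcases List.mem_cons.mp this with heq | hin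
          · exact absurd (h ▸ heq) (ne_of_gt hgt)
          · exact hin
        have htail := ih rest hks' hit' hrest_sub
        obtain ⟨k', v⟩ := p
        simp only at h
        subst h
        simp only [mergeRow, List.map_cons]
        rw [lookupD_cons_self ⟨k', v⟩ rest, htail]
        refine congrArg _ (List.map_congr_left ?_)
        intro x hx
        have hlt : k' < x := hksp x hx
        rw [lookupD_cons_of_ne ⟨k', v⟩ rest x (ne_of_lt hlt)]
      · -- head of items belongs to a later key
        have hpks : p.1 ∈ ks := by
          rcases List.mem_cons.mp (hsub p List.mem_cons_self) with heq | hin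
          · exact absurd heq h
          · exact hin
        have hkp : k < p.1 := hksp _ hpks
        have hsub' : ∀ q ∈ p :: rest, q.1 ∈ ks := by
          intro q hq
          rcases List.mem_cons.mp hq with heq | hin
          · exact heq ▸ hpks
          · have hgt : p.1 < q.1 := hitp q hin
            rcases List.mem_cons.mp (hsub q (List.mem_cons_of_mem _ hin)) with heq2 | hin2
            · exact absurd heq2 (ne_of_gt (lt_trans hkp hgt))
            · exact hin2
        have hlk : lookupD (p :: rest) k = "" := by
          apply lookupD_eq_empty
          intro q hq
          rcases List.mem_cons.mp hq with heq | hin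
          · exact heq ▸ (ne_of_gt hkp)
          · exact ne_of_gt (lt_trans hkp (hitp q hin))
        obtain ⟨k', v⟩ := p
        simp only at h
        simp only [mergeRow, if_neg h, List.map_cons, hlk]
        exact congrArg _ (ih ((k', v) :: rest) hks' hit hsub')

-- dict(row) for a row with distinct keys returns exactly row as items
lemma ofList_map_items (keys : List String) (g : String → String) (hnd : keys.Nodup) :
    (PySem.Dict.ofList (keys.map (fun k => (k, g k)))).items = keys.map (fun k => (k, g k)) := by
  have hof : PySem.Dict.ofList (keys.map fun k => (k, g k)) =
      keys.foldl (fun d k => d.insert k (g k)) PySem.Dict.empty := by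
    show (keys.map fun k => (k, g k)).foldl
        (fun d p => d.insert p.1 p.2) PySem.Dict.empty = _
    rw [List.foldl_map]
  rw [hof]
  have := PySem.Dict.items_foldl_insert_fresh (l := keys) (k := fun k => k) (v := g)
    (d := (PySem.Dict.empty : PySem.Dict String String))
    (by intro a _; simp) (by simpa using hnd)
  simpa using this

-- the first match in the sorted item list is exactly A's membership-test value
lemma lookupD_eq_valA (pf : List (String × String)) (k : String)
    (items : List (String × String))
    (hperm : items.Perm (PySem.Dict.ofList pf).items) :
    lookupD items k =
      (if (PySem.Dict.ofList pf).contains k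
       then ((PySem.Dict.ofList pf).get? k).getD "" else "") := by
  set d := PySem.Dict.ofList pf with hd
  have hdnd : d.keys.Nodup := PySem.Dict.nodup_keys_ofList pf
  cases hfind : items.find? (fun p => p.1 == k) with
  | none =>
    have hnc : d.contains k = false := by
      by_contra hc
      have hc' : d.contains k = true := by
        cases h : d.contains k
        · exact absurd h hc
        · rfl
      obtain ⟨v, hv⟩ : ∃ v, d.get? k = some v := by
        cases hg : d.get? k with
        | some v => exact ⟨v, rfl⟩
        | none =>
          rw [(PySem.Dict.get?_eq_none_iff_contains (d := d) (k := k)).mp hg] at hc'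
          exact (Bool.false_ne_true hc').elim
      have hmem : (k, v) ∈ items := hperm.mem_iff.mpr (PySem.Dict.mem_items_of_get?_eq_some _ hv)
      have := List.find?_eq_none.mp hfind (k, v) hmem
      simp at this
    simp [lookupD, hfind, hnc]
  | some p =>
    have hp1 : p.1 = k := by simpa using List.find?_some hfind
    have hpmem : p ∈ d.items := hperm.mem_iff.mp (List.mem_of_find?_eq_some hfind)
    have hget : d.get? p.1 = some p.2 := PySem.Dict.get?_of_mem_items _ hpmem hdnd
    rw [hp1] at hget
    have hc : d.contains k = true := by
      rw [PySem.Dict.contains_eq_isSome_get?, hget]; rfl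
    simp [lookupD, hfind, hc, hget]

-- per-profile equality of the two row constructions
lemma row_eq (keys : List String) (hnd : keys.Nodup) (hks : keys.Pairwise (· < ·))
    (pf : List (String × String))
    (hsubk : ∀ k ∈ (PySem.Dict.ofList pf).keys, k ∈ keys) :
    (keys.foldl (fun t k =>
      t.insert k (if (PySem.Dict.ofList pf).contains k
                  then ((PySem.Dict.ofList pf).get? k).getD "" else ""))
      (PySem.Dict.empty : PySem.Dict String String)).items
    =
    (PySem.Dict.ofList (mergeRow keys
      (PySem.List.sorted (PySem.Dict.ofList pf).items (fun p => p.1) false))).items := by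
  set d := PySem.Dict.ofList pf with hd
  set items := PySem.List.sorted d.items (fun p => p.1) false with hitems
  have hperm : items.Perm d.items := PySem.List.sorted_perm _ _ _
  have hdnd : d.keys.Nodup := PySem.Dict.nodup_keys_ofList pf
  have hfstnd : (items.map Prod.fst).Nodup := by
    have : (items.map Prod.fst).Perm (d.items.map Prod.fst) := hperm.map _
    exact this.nodup_iff.mpr hdnd
  have hitlt : items.Pairwise (fun a b => a.1 < b.1) := by
    have hle : items.Pairwise (fun a b => a.1 ≤ b.1) :=
      PySem.List.sorted_pairwise (xs := d.items) (key := fun p => p.1)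
    have hne : items.Pairwise (fun a b => a.1 ≠ b.1) := by
      rw [← List.pairwise_map (f := Prod.fst)]
      exact hfstnd
    exact (hle.and hne).imp (fun h => lt_of_le_of_ne h.1 h.2)
  have hsub : ∀ p ∈ items, p.1 ∈ keys := by
    intro p hp
    exact hsubk p.1 (List.mem_map_of_mem (hperm.mem_iff.mp hp))
  -- A side: the fresh-key insert loop appends in order
  have hA : (keys.foldl (fun t k =>
      t.insert k (if d.contains k then (d.get? k).getD "" else ""))
      (PySem.Dict.empty : PySem.Dict String String)).items
      = keys.map (fun k => (k, if d.contains k then (d.get? k).getD "" else "")) := by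
    have := PySem.Dict.items_foldl_insert_fresh (l := keys) (k := fun k => k)
      (v := fun k => if d.contains k then (d.get? k).getD "" else "")
      (d := (PySem.Dict.empty : PySem.Dict String String))
      (by intro a _; simp) (by simpa using hnd)
    simpa using this
  rw [hA, mergeRow_eq_map keys items hks hitlt hsub,
      ofList_map_items keys (lookupD items) hnd]
  exact (List.map_congr_left (fun k _ => by rw [lookupD_eq_valA pf k items hperm])).symm

-- ===== VERDICT (by name: the statement is the Claim_ definition above) =====
theorem homogenize_spec : Claim_equal_homogenize := by
  intro profiles _
  unfold Spec_homogenize homogenize homogenize_alt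
  simp only []
  set keys0 := profiles.flatMap (fun sub => (PySem.Dict.ofList sub).keys) with hk0
  set keys := PySem.List.sorted (PySem.Set.ofList keys0) (fun k => k) false with hkeys
  have hks : keys.Pairwise (· < ·) := PySem.List.sorted_ofList_pairwise_lt keys0
  have hnd : keys.Nodup := hks.imp ne_of_lt
  rw [PySem.List.foldl_append_singleton_eq_map]
  simp only [List.nil_append]
  apply List.map_congr_left
  intro pf hpf
  exact row_eq keys hnd hks pf (by
    intro k hkmem
    rw [hkeys, PySem.List.mem_sorted, PySem.Set.mem_ofList _ _]
    exact List.mem_flatMap.mpr ⟨pf, hpf, hkmem⟩)
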